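-- pv_equiv track=rewrite | github.com/shlomota/MeloDetective | generate_midi.py | remove_short_notes
-- ===== SOURCE A (Python) =====
-- def remove_short_notes(pitches, min_note_length):
--     cleaned_pitches = []
--     current_note = None
--     note_length = 0
--
--     for pitch in pitches:
--         if current_note is None:
--             current_note = pitch
--             note_length = 1
--         elif pitch == current_note:
--             note_length += 1
--         else:
--             if note_length >= min_note_length:
--                 cleaned_pitches.extend([current_note] * note_length)
--             current_note = pitch
--             note_length = 1
--
--     if note_length >= min_note_length:
--         cleaned_pitches.extend([current_note] * note_length)
--
--     return cleaned_pitches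
-- ===== SOURCE B (Python) =====
-- def remove_short_notes(pitches, min_note_length):
--     n = len(pitches)
--     # fwd[i]: length of the run of equal pitches ending at i
--     fwd = [1] * n
--     for i in range(1, n):
--         if pitches[i] == pitches[i - 1]:
--             fwd[i] = fwd[i - 1] + 1
--     # bwd[i]: length of the run of equal pitches starting at i
--     bwd = [1] * n
--     for i in range(n - 2, -1, -1):
--         if pitches[i] == pitches[i + 1]:
--             bwd[i] = bwd[i + 1] + 1
--     # keep an element iff the maximal run containing it is long enough
--     return [p for i, p in enumerate(pitches) if fwd[i] + bwd[i] - 1 >= min_note_length]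
-- ===== Notes on version B (the rewrite author's own statement) =====
-- stated objective: alternative
-- what changed: Replaces A's single-pass run state machine (current_note/note_length with a duplicated final flush) by a per-element formulation: two DP passes build forward and backward run-length arrays, and a pointwise filter keeps each pitch iff fwd[i]+bwd[i]-1 >= min_note_length.
import Mathlib
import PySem

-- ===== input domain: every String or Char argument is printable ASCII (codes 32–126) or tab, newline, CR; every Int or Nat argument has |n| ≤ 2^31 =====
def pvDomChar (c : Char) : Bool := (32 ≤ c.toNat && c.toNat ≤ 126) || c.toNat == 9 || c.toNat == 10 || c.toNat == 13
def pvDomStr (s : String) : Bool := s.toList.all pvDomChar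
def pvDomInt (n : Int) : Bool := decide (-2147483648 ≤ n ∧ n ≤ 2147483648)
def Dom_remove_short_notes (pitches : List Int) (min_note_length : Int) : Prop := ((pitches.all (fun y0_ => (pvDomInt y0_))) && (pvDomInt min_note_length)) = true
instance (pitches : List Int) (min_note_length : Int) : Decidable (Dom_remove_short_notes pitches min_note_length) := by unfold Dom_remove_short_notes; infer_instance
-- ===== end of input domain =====

-- B replaces A's run state machine by a per-element formulation: two passes build forward and
-- backward run-length arrays, then a pointwise filter keeps each pitch (objective: alternative).

-- ===== PORT A =====
-- one loop-body step of A (state: cleaned_pitches, current_note, note_length)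
def aStep (min_note_length : Int) (st : List Int × Option Int × Int) (pitch : Int) :
    List Int × Option Int × Int :=
  match st with
  | (cleaned, none, _) => (cleaned, some pitch, 1)
  | (cleaned, some c, len) =>
    if pitch = c then (cleaned, some c, len + 1)
    else if len ≥ min_note_length then
      (cleaned ++ List.replicate len.toNat c, some pitch, 1)
    else (cleaned, some pitch, 1)

-- A's final flush after the loop ([current_note] * note_length; note_length = 0 when current_note is None)
def aFinish (min_note_length : Int) (st : List Int × Option Int × Int) : List Int :=
  if st.2.2 ≥ min_note_length then
    st.1 ++ (match st.2.1 with
             | some c => List.replicate st.2.2.toNat c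
             | none => [])
  else st.1

def remove_short_notes (pitches : List Int) (min_note_length : Int) : List Int :=
  aFinish min_note_length (pitches.foldl (aStep min_note_length) ([], none, 0))

-- ===== PORT B =====
-- Source B's first pass: fwd[i] = run length ending at i (fwd[i] = fwd[i-1]+1 if equal to the
-- previous pitch, else 1); ported as a left-to-right recursion carrying the previous pitch
-- and its fwd value, which is exactly what the index loop reads
def fwdFrom (prevPitch : Int) (prevCnt : Nat) : List Int → List Nat
  | [] => []
  | p :: t =>
    let c := if p = prevPitch then prevCnt + 1 else 1
    c :: fwdFrom p c t

def fwdList : List Int → List Nat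
  | [] => []
  | p :: t => 1 :: fwdFrom p 1 t

-- Source B's second pass: bwd[i] = run length starting at i, filled right-to-left; ported as a
-- recursion that computes the tail's array first and reads its head (= bwd[i+1])
def bwdList : List Int → List Nat
  | [] => []
  | [_] => [1]
  | p :: q :: t =>
    match bwdList (q :: t) with
    | c :: cs => (if p = q then c + 1 else 1) :: c :: cs
    | [] => [1]   -- unreachable: bwdList of a nonempty list is nonempty

-- Source B's final comprehension: keep pitches[i] iff fwd[i] + bwd[i] - 1 >= min_note_length
def remove_short_notes_alt (pitches : List Int) (min_note_length : Int) : List Int :=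
  ((pitches.zip ((fwdList pitches).zip (bwdList pitches))).filter
      (fun pr => decide ((pr.2.1 : Int) + (pr.2.2 : Int) - 1 ≥ min_note_length))).map Prod.fst

-- ===== PRECONDITION & SPEC =====
def Spec_remove_short_notes (pitches : List Int) (min_note_length : Int) (out : List Int) : Prop := out = remove_short_notes_alt pitches min_note_length
instance (pitches : List Int) (min_note_length : Int) (out : List Int) : Decidable (Spec_remove_short_notes pitches min_note_length out) := by unfold Spec_remove_short_notes; infer_instance

-- ===== CLAIM (what is proved, stated in full; the proofs are below) =====
def Claim_equal_remove_short_notes : Prop := ∀ (pitches : List Int) (min_note_length : Int), Dom_remove_short_notes pitches min_note_length → Spec_remove_short_notes pitches min_note_length (remove_short_notes pitches min_note_length)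

-- ===== LEMMAS AND PROOFS =====

-- length of the leading run of x's
def countLead (x : Int) : List Int → Nat
  | [] => 0
  | y :: t => if y = x then countLead x t + 1 else 0

-- reference form: peel one maximal run per step
def rspec (m : Int) : List Int → List Int
  | [] => []
  | x :: t =>
    (if (countLead x t : Int) + 1 ≥ m then List.replicate (countLead x t + 1) x else []) ++
      rspec m (t.drop (countLead x t))
termination_by l => l.length
decreasing_by simp only [List.length_drop, List.length_cons]; omega

theorem rspec_nil (m : Int) : rspec m [] = [] := by unfold rspec; rfl

theorem rspec_cons (m x : Int) (t : List Int) :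
    rspec m (x :: t) =
      (if (countLead x t : Int) + 1 ≥ m then List.replicate (countLead x t + 1) x else []) ++
        rspec m (t.drop (countLead x t)) := by conv_lhs => unfold rspec

theorem take_countLead (x : Int) (t : List Int) :
    t.take (countLead x t) = List.replicate (countLead x t) x := by
  induction t with
  | nil => simp [countLead]
  | cons y t ih =>
    by_cases hx : y = x
    · subst hx; simp [countLead, List.replicate_succ, ih]
    · simp [countLead, hx]

theorem cast_succ_toNat (n : Nat) : ((n : Int) + 1).toNat = n + 1 := by omega

theorem aLoop_run (m : Int) (t : List Int) : ∀ (acc : List Int) (c : Int) (k : Int), 1 ≤ k →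
    aFinish m (t.foldl (aStep m) (acc, some c, k)) =
      acc ++ (if k + (countLead c t : Int) ≥ m then List.replicate (k + (countLead c t : Int)).toNat c else []) ++
        rspec m (t.drop (countLead c t)) := by
  induction t with
  | nil =>
    intro acc c k hk
    simp only [List.foldl_nil, countLead, Nat.cast_zero, add_zero, List.drop_nil, rspec_nil,
      List.append_nil, aFinish]
    split <;> simp
  | cons y t ih =>
    intro acc c k hk
    by_cases hy : y = c
    · subst hy
      rw [List.foldl_cons]
      have hstep : aStep m (acc, some y, k) y = (acc, some y, k + 1) := by simp [aStep]
      rw [hstep, ih acc y (k + 1) (by omega)]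
      have hc : countLead y (y :: t) = countLead y t + 1 := by simp [countLead]
      have e : k + 1 + (countLead y t : Int) = k + ((countLead y t + 1 : Nat) : Int) := by
        push_cast; ring
      rw [hc, List.drop_succ_cons, e]
    · rw [List.foldl_cons]
      have hstep : aStep m (acc, some c, k) y =
          (if k ≥ m then (acc ++ List.replicate k.toNat c, some y, 1) else (acc, some y, 1)) := by
        simp [aStep, hy]
      have hc0 : countLead c (y :: t) = 0 := by simp [countLead, hy]
      rw [hstep, hc0]
      simp only [Nat.cast_zero, add_zero, List.drop_zero]
      have e : (1 : Int) + (countLead y t : Int) = (countLead y t : Int) + 1 := by ring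
      by_cases hk2 : k ≥ m
      · rw [if_pos hk2, ih (acc ++ List.replicate k.toNat c) y 1 (by omega), rspec_cons,
          if_pos hk2, e, cast_succ_toNat]
        simp
      · rw [if_neg hk2, ih acc y 1 (by omega), rspec_cons, if_neg hk2, e, cast_succ_toNat]
        simp

theorem A_eq_rspec (pitches : List Int) (m : Int) :
    remove_short_notes pitches m = rspec m pitches := by
  cases pitches with
  | nil =>
    simp only [remove_short_notes, List.foldl_nil, aFinish, rspec_nil]
    split <;> simp
  | cons x t =>
    simp only [remove_short_notes, List.foldl_cons]
    have hstep : aStep m ([], none, 0) x = ([], some x, 1) := by simp [aStep]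
    have e : (1 : Int) + (countLead x t : Int) = (countLead x t : Int) + 1 := by ring
    rw [hstep, aLoop_run m t [] x 1 (by omega), rspec_cons, e, cast_succ_toNat]
    simp

theorem countLead_le (x : Int) (t : List Int) : countLead x t ≤ t.length := by
  induction t with
  | nil => simp [countLead]
  | cons y t ih =>
    by_cases hx : y = x
    · simp only [countLead, if_pos hx, List.length_cons]; omega
    · simp [countLead, hx]

-- the element just after the leading run differs from the run value
theorem countLead_drop_head (x : Int) (t : List Int) :
    ∀ y ∈ (t.drop (countLead x t)).head?, y ≠ x := by
  induction t with
  | nil => simp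
  | cons z t ih =>
    by_cases hz : z = x
    · subst hz
      simp only [countLead, if_pos]
      exact ih
    · simp [countLead, hz]

-- [a+1, a+2, ..., a+k]
def ascFrom : Nat → Nat → List Nat
  | _, 0 => []
  | c, k + 1 => (c + 1) :: ascFrom (c + 1) k

-- [n, n-1, ..., 1]
def descList : Nat → List Nat
  | 0 => []
  | n + 1 => (n + 1) :: descList n

theorem ascFrom_length (c k : Nat) : (ascFrom c k).length = k := by
  induction k generalizing c with
  | zero => rfl
  | succ k ih => simp [ascFrom, ih]

theorem descList_length (n : Nat) : (descList n).length = n := by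
  induction n with
  | zero => rfl
  | succ n ih => simp [descList, ih]

theorem bwdList_length (l : List Int) : (bwdList l).length = l.length := by
  match l with
  | [] => rfl
  | [a] => rfl
  | p :: q :: t =>
    have ih := bwdList_length (q :: t)
    cases h : bwdList (q :: t) with
    | nil => rw [h] at ih; simp at ih
    | cons c cs =>
      rw [h] at ih
      simp only [bwdList, h, List.length_cons] at ih ⊢
      omega

theorem fwdFrom_ne (x : Int) (c : Nat) (rest : List Int)
    (h : ∀ y ∈ rest.head?, y ≠ x) : fwdFrom x c rest = fwdList rest := by
  cases rest with
  | nil => rfl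
  | cons q rs =>
    have hq : q ≠ x := h q (by simp)
    simp [fwdFrom, fwdList, hq]

theorem fwdFrom_rep (x : Int) (rest : List Int) :
    ∀ (k c : Nat), fwdFrom x c (List.replicate k x ++ rest) =
      ascFrom c k ++ fwdFrom x (c + k) rest := by
  intro k
  induction k with
  | zero => intro c; simp [ascFrom]
  | succ k ih =>
    intro c
    simp only [List.replicate_succ, List.cons_append, fwdFrom, ascFrom, if_pos]
    rw [ih (c + 1), show c + 1 + k = c + (k + 1) from by omega]

theorem fwdList_cons (p : Int) (t : List Int) : fwdList (p :: t) = 1 :: fwdFrom p 1 t := rfl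

theorem ascFrom_succ (c k : Nat) : ascFrom c (k + 1) = (c + 1) :: ascFrom (c + 1) k := rfl

theorem fwd_run (x : Int) (k : Nat) (rest : List Int)
    (h : ∀ y ∈ rest.head?, y ≠ x) :
    fwdList (List.replicate (k + 1) x ++ rest) = ascFrom 0 (k + 1) ++ fwdList rest := by
  rw [show List.replicate (k + 1) x ++ rest = x :: (List.replicate k x ++ rest) from by
        simp [List.replicate_succ],
      fwdList_cons, fwdFrom_rep, fwdFrom_ne x (1 + k) rest h, ascFrom_succ]
  simp

theorem bwd_run (x : Int) (rest : List Int) (h : ∀ y ∈ rest.head?, y ≠ x) :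
    ∀ (k : Nat), bwdList (List.replicate (k + 1) x ++ rest) = descList (k + 1) ++ bwdList rest := by
  intro k
  induction k with
  | zero =>
    cases rest with
    | nil => simp [bwdList, descList]
    | cons q rs =>
      have hq : q ≠ x := h q (by simp)
      have hlen := bwdList_length (q :: rs)
      cases hb : bwdList (q :: rs) with
      | nil => rw [hb] at hlen; simp at hlen
      | cons c cs =>
        have hxq : ¬ x = q := fun e => hq e.symm
        simp only [List.replicate_succ, List.replicate_zero, List.cons_append, List.nil_append,
          bwdList, hb, descList]
        simp [hxq]
  | succ k ih =>
    have hrep : List.replicate (k + 1 + 1) x ++ rest = x :: (List.replicate (k + 1) x ++ rest) := by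
      simp [List.replicate_succ]
    rw [hrep]
    have hmem : List.replicate (k + 1) x ++ rest = x :: (List.replicate k x ++ rest) := by
      simp [List.replicate_succ]
    rw [show (x :: (List.replicate (k + 1) x ++ rest)) = x :: x :: (List.replicate k x ++ rest) from by rw [hmem]]
    have ih' : bwdList (x :: (List.replicate k x ++ rest)) = descList (k + 1) ++ bwdList rest := by
      rw [← hmem]; exact ih
    simp only [descList] at ih'
    simp only [bwdList, ih']
    simp [descList]

-- the run segment of the comprehension: fwd+bwd-1 is constant (= a + L) over a run
theorem seg (x m : Int) : ∀ (L a : Nat),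
    (((List.replicate L x).zip ((ascFrom a L).zip (descList L))).filter
        (fun pr => decide ((pr.2.1 : Int) + (pr.2.2 : Int) - 1 ≥ m))).map Prod.fst
      = if ((a : Int) + (L : Int) ≥ m) then List.replicate L x else [] := by
  intro L
  induction L with
  | zero => intro a; simp [ascFrom, descList]
  | succ L ih =>
    intro a
    simp only [List.replicate_succ, ascFrom, descList, List.zip_cons_cons, List.filter_cons]
    have hcond : (((a : Nat) + 1 : Nat) : Int) + (((L : Nat) + 1 : Nat) : Int) - 1 ≥ m ↔
        ((a : Int) + ((L + 1 : Nat) : Int) ≥ m) := by push_cast; omega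
    have hcond2 : (((a + 1 : Nat)) : Int) + ((L : Nat) : Int) ≥ m ↔
        ((a : Int) + ((L + 1 : Nat) : Int) ≥ m) := by push_cast; omega
    by_cases hm : (a : Int) + ((L + 1 : Nat) : Int) ≥ m
    · rw [if_pos hm]
      have h1 : (decide ((((a + 1 : Nat)) : Int) + (((L + 1 : Nat)) : Int) - 1 ≥ m)) = true := by
        rw [decide_eq_true_iff]; exact hcond.mpr hm
      simp only [h1, if_true, List.map_cons]
      rw [ih (a + 1), if_pos (hcond2.mpr hm)]
    · rw [if_neg hm]
      have h1 : (decide ((((a + 1 : Nat)) : Int) + (((L + 1 : Nat)) : Int) - 1 ≥ m)) = false := by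
        rw [decide_eq_false_iff_not]; exact fun hc => hm (hcond.mp hc)
      simp only [h1, Bool.false_eq_true, if_false]
      rw [ih (a + 1), if_neg (fun hc => hm (hcond2.mp hc))]

theorem B_eq_rspec (m : Int) (xs : List Int) :
    remove_short_notes_alt xs m = rspec m xs := by
  match xs with
  | [] => simp [remove_short_notes_alt, fwdList, bwdList, rspec_nil]
  | x :: t =>
    have hk := countLead_le x t
    set k := countLead x t with hkdef
    have hrest := countLead_drop_head x t
    rw [← hkdef] at hrest
    have hdec : x :: t = List.replicate (k + 1) x ++ t.drop k := by
      have := take_countLead x t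
      rw [← hkdef] at this
      conv_lhs => rw [← List.take_append_drop k t]
      simp [List.replicate_succ, this]
    have ihrec := B_eq_rspec m (t.drop k)
    rw [hdec]
    unfold remove_short_notes_alt
    rw [fwd_run x k (t.drop k) hrest, bwd_run x (t.drop k) hrest k]
    have hz1 : ((ascFrom 0 (k + 1)) ++ fwdList (t.drop k)).zip ((descList (k + 1)) ++ bwdList (t.drop k))
        = (ascFrom 0 (k + 1)).zip (descList (k + 1)) ++ (fwdList (t.drop k)).zip (bwdList (t.drop k)) := by
      apply List.zip_append
      rw [ascFrom_length, descList_length]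
    rw [hz1]
    have hz2 : (List.replicate (k + 1) x ++ t.drop k).zip
          ((ascFrom 0 (k + 1)).zip (descList (k + 1)) ++ (fwdList (t.drop k)).zip (bwdList (t.drop k)))
        = (List.replicate (k + 1) x).zip ((ascFrom 0 (k + 1)).zip (descList (k + 1)))
          ++ (t.drop k).zip ((fwdList (t.drop k)).zip (bwdList (t.drop k))) := by
      apply List.zip_append
      rw [List.length_replicate, List.length_zip, ascFrom_length, descList_length]
      omega
    rw [hz2, List.filter_append, List.map_append]
    rw [seg x m (k + 1) 0]
    unfold remove_short_notes_alt at ihrec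
    rw [ihrec]
    have hsame : (((0 : Nat) : Int) + ((k + 1 : Nat) : Int) ≥ m) ↔ ((k : Int) + 1 ≥ m) := by
      push_cast; omega
    rw [show List.replicate (k + 1) x ++ List.drop k t = x :: t from hdec.symm,
      rspec_cons, ← hkdef]
    simp only [hsame]
termination_by xs.length
decreasing_by
  simp only [List.length_drop, List.length_cons]
  omega

-- ===== VERDICT (by name: the statement is the Claim_ definition above) =====
theorem remove_short_notes_spec : Claim_equal_remove_short_notes := by
  intro pitches m _
  unfold Spec_remove_short_notes
  rw [A_eq_rspec, B_eq_rspec]
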